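-- pv_equiv track=rewrite | github.com/kusdmi/Education | python_home_work_13.py | get_white_boundary
-- ===== SOURCE A (Python) =====
-- def get_white_boundary(black_region, matrix):
--     """Находит белые пиксели, граничащие с черной областью."""
--     n = 10
--     white_boundary = set()
--     for r, c in black_region:
--         for dr, dc in ((1, 0), (-1, 0), (0, 1), (0, -1)):
--             nr, nc = r + dr, c + dc
--             if 0 <= nr < n and 0 <= nc < n and matrix[nr][nc] == 1:
--                 white_boundary.add((nr, nc))
--     return white_boundary
-- ===== SOURCE B (Python) =====
-- def get_white_boundary(black_region, matrix):
--     """Находит белые пиксели, граничащие с черной областью."""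
--     white = {(r, c)
--              for r, row in enumerate(matrix[:10])
--              for c, v in enumerate(row[:10])
--              if v == 1}
--     neighbours = {(r + dr, c + dc)
--                   for r, c in black_region
--                   for dr, dc in ((1, 0), (-1, 0), (0, 1), (0, -1))}
--     return neighbours & white
-- ===== Notes on version B (the rewrite author's own statement) =====
-- stated objective: alternative
-- what changed: A does one nested loop over black cells and directions with a per-neighbour bounds check and matrix indexing; B is a staged set pipeline: one grid scan builds the set of white pixels, a comprehension builds the set of all grid-neighbours of the black region, and the result is their intersection, with no indexing and no per-neighbour test loop.
import Mathlib
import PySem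

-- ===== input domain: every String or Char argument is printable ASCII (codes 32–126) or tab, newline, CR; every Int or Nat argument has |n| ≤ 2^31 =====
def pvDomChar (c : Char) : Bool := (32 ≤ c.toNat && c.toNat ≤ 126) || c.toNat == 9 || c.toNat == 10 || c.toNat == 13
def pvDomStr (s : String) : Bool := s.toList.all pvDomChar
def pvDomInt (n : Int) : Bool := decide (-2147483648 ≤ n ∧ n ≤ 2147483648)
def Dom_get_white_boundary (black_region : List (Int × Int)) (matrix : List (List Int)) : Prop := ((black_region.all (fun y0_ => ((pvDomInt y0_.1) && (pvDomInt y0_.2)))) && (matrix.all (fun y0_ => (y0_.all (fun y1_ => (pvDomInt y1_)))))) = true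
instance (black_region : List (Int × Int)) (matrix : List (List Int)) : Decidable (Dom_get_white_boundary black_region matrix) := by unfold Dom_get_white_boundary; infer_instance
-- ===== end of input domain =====

-- B replaces A's per-neighbour bounds-check + matrix indexing by a set-intersection pipeline:
-- it builds the set of white pixels and the set of grid-neighbours of the black region and
-- intersects them (alternative decomposition; B never indexes the matrix, so it is total).


-- ===== PORT A =====
def pvDirs : List (Int × Int) := [(1, 0), (-1, 0), (0, 1), (0, -1)]

def get_white_boundary (black_region : List (Int × Int)) (matrix : List (List Int)) : List (Int × Int) :=
  black_region.foldl (fun wb p =>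
    pvDirs.foldl (fun wb d =>
      -- 'matrix[nr][nc] == 1': where Python raises IndexError the double pyGet? is none
      -- (≠ some 1, condition false); exactly those inputs are excluded by Pre_.
      if 0 ≤ p.1 + d.1 ∧ p.1 + d.1 < 10 ∧ 0 ≤ p.2 + d.2 ∧ p.2 + d.2 < 10 ∧
          ((PySem.List.pyGet? matrix (p.1 + d.1)).bind
            fun row => PySem.List.pyGet? row (p.2 + d.2)) = some 1
      then PySem.Set.add wb (p.1 + d.1, p.2 + d.2) else wb) wb)
    PySem.Set.empty

-- ===== PORT B =====
-- the set comprehension over enumerate(matrix[:10]) / enumerate(row[:10])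
def pvWhitePixels (matrix : List (List Int)) : PySem.Set (Int × Int) :=
  (PySem.List.enumerate (PySem.List.slice matrix none (some 10)) 0).foldl (fun w rr =>
    (PySem.List.enumerate (PySem.List.slice rr.2 none (some 10)) 0).foldl (fun w cv =>
      if cv.2 = 1 then PySem.Set.add w (rr.1, cv.1) else w) w)
    PySem.Set.empty

def get_white_boundary_alt (black_region : List (Int × Int)) (matrix : List (List Int)) : List (Int × Int) :=
  let white := pvWhitePixels matrix
  let neighbours := PySem.Set.ofList
    (black_region.flatMap fun p => pvDirs.map fun d => (p.1 + d.1, p.2 + d.2))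
  PySem.Set.inter neighbours white

-- ===== PRECONDITION & SPEC =====
-- Pre_ excludes exactly the inputs where A raises IndexError: some in-grid neighbour
-- (both coordinates between 0 and 9) of a black cell indexes outside the actual matrix.
def Pre_get_white_boundary (black_region : List (Int × Int)) (matrix : List (List Int)) : Prop :=
  ∀ p ∈ black_region, ∀ d ∈ pvDirs,
    (0 ≤ p.1 + d.1 ∧ p.1 + d.1 ≤ 9 ∧ 0 ≤ p.2 + d.2 ∧ p.2 + d.2 ≤ 9) →
    ((PySem.List.pyGet? matrix (p.1 + d.1)).bind
      fun row => PySem.List.pyGet? row (p.2 + d.2)).isSome = true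
instance (black_region : List (Int × Int)) (matrix : List (List Int)) : Decidable (Pre_get_white_boundary black_region matrix) := by unfold Pre_get_white_boundary; infer_instance

def pvWitness_get_white_boundary : (List (Int × Int)) × List (List Int) :=
  ([(2, 0), (2, 1)], [[0, 0, 1], [0, 0, 1], [1, 1, 1], [1, 1, 1]])

def Spec_get_white_boundary (black_region : List (Int × Int)) (matrix : List (List Int)) (out : List (Int × Int)) : Prop := out = get_white_boundary_alt black_region matrix
instance (black_region : List (Int × Int)) (matrix : List (List Int)) (out : List (Int × Int)) : Decidable (Spec_get_white_boundary black_region matrix out) := by unfold Spec_get_white_boundary; infer_instance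

-- ===== CLAIM (what is proved, stated in full; the proofs are below) =====
def Claim_equal_get_white_boundary : Prop := ∀ (black_region : List (Int × Int)) (matrix : List (List Int)), Dom_get_white_boundary black_region matrix → Pre_get_white_boundary black_region matrix → Spec_get_white_boundary black_region matrix (get_white_boundary black_region matrix)


-- ===== LEMMAS AND PROOFS =====

-- filtering by membership in w commutes with Set.add
lemma filter_contains_add {α : Type} [BEq α] [LawfulBEq α] (w s : List α) (x : α) :
    List.filter (fun y => PySem.Set.contains w y) (PySem.Set.add s x) =
      if PySem.Set.contains w x then
        PySem.Set.add (List.filter (fun y => PySem.Set.contains w y) s) x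
      else List.filter (fun y => PySem.Set.contains w y) s := by
  unfold PySem.Set.add
  by_cases hx : x ∈ s <;> by_cases hw : x ∈ w <;>
    simp [hx, hw, List.filter_append]

-- filtering the set built by repeated add = building with a conditional add
lemma foldl_if_filter {α : Type} [BEq α] [LawfulBEq α] (w : List α) (l : List α) (s : List α) :
    l.foldl (fun s q => if PySem.Set.contains w q then PySem.Set.add s q else s)
      (List.filter (fun y => PySem.Set.contains w y) s)
    = List.filter (fun y => PySem.Set.contains w y) (l.foldl PySem.Set.add s) := by
  induction l generalizing s with
  | nil => rfl
  | cons a l ih =>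
    rw [List.foldl_cons, List.foldl_cons, ← ih, filter_contains_add]

-- membership in a fold that conditionally adds f x
lemma mem_foldl_add_if {α β : Type} [BEq β] [LawfulBEq β] (l : List α) (P : α → Prop)
    [DecidablePred P] (f : α → β) (s : PySem.Set β) (q : β) :
    q ∈ l.foldl (fun s x => if P x then PySem.Set.add s (f x) else s) s ↔
      q ∈ s ∨ ∃ x ∈ l, P x ∧ q = f x := by
  induction l generalizing s with
  | nil => simp
  | cons a l ih =>
    simp only [List.foldl_cons, ih]
    split_ifs with h <;> simp [PySem.Set.mem_add] <;> tauto

-- membership in a fold whose step adds exactly the elements described by Q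
lemma mem_foldl_of_step {α β : Type} (l : List α) (g : List β → α → List β)
    (Q : α → β → Prop) (h : ∀ s x q, q ∈ g s x ↔ q ∈ s ∨ Q x q) (s : List β) (q : β) :
    q ∈ l.foldl g s ↔ q ∈ s ∨ ∃ x ∈ l, Q x q := by
  induction l generalizing s with
  | nil => simp
  | cons a l ih => simp only [List.foldl_cons, ih, h, List.exists_mem_cons_iff]; tauto

-- the white-pixel set contains q iff matrix[q.1][q.2] exists within the 10x10 grid and equals 1
lemma mem_whitePixels (matrix : List (List Int)) (q : Int × Int) :
    q ∈ pvWhitePixels matrix ↔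
      0 ≤ q.1 ∧ q.1 < 10 ∧ 0 ≤ q.2 ∧ q.2 < 10 ∧
      ((PySem.List.pyGet? matrix q.1).bind
        fun row => PySem.List.pyGet? row q.2) = some 1 := by
  have hsl : ∀ (α : Type) (xs : List α), PySem.List.slice xs none (some 10) = xs.take 10 := by
    intro α xs; simp [pysem]
  unfold pvWhitePixels
  rw [hsl]
  rw [mem_foldl_of_step _ _
      (fun rr q => ∃ cv ∈ PySem.List.enumerate (PySem.List.slice rr.2 none (some 10)) 0,
        cv.2 = 1 ∧ q = (rr.1, cv.1))
      (fun s rr q => mem_foldl_add_if _ _ _ _ _)]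
  simp only [PySem.Set.empty, List.not_mem_nil, false_or, hsl]
  constructor
  · rintro ⟨rr, hrr, cv, hcv, hv, rfl⟩
    rw [PySem.List.mem_enumerate_iff] at hrr hcv
    obtain ⟨k, hk, rfl⟩ := hrr
    obtain ⟨j, hj, rfl⟩ := hcv
    simp only [zero_add] at *
    simp only [List.getElem_take] at *
    have hkm : k < matrix.length := by simp [List.length_take] at hk; omega
    have hk10 : k < 10 := by simp [List.length_take] at hk; omega
    have hjr : j < matrix[k].length := by simp [List.length_take] at hj; omega
    have hj10 : j < 10 := by simp [List.length_take] at hj; omega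
    refine ⟨by positivity, by exact_mod_cast hk10, by positivity, by exact_mod_cast hj10, ?_⟩
    rw [PySem.List.pyGet?_natCast]
    simp [List.getElem?_eq_getElem hkm, PySem.List.pyGet?_natCast, List.getElem?_eq_getElem hjr]
    simpa [List.getElem_take] using hv
  · obtain ⟨q1, q2⟩ := q
    rintro ⟨h1, h2, h3, h4, h5⟩
    simp only at h1 h2 h3 h4 h5 ⊢
    obtain ⟨r, rfl⟩ := Int.eq_ofNat_of_zero_le h1
    obtain ⟨c, rfl⟩ := Int.eq_ofNat_of_zero_le h3
    rw [PySem.List.pyGet?_natCast] at h5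
    cases hrow : matrix[r]? with
    | none => simp [hrow] at h5
    | some row =>
      obtain ⟨hrm, hrowv⟩ := List.getElem?_eq_some_iff.mp hrow
      rw [hrow] at h5
      simp only [Option.bind_some] at h5
      rw [PySem.List.pyGet?_natCast] at h5
      obtain ⟨hcm, hcv⟩ := List.getElem?_eq_some_iff.mp h5
      have hr10 : r < 10 := by exact_mod_cast h2
      have hc10 : c < 10 := by exact_mod_cast h4
      refine ⟨((0:Int) + r, row), ?_, ((0:Int)+c, (1:Int)), ?_, rfl, by simp⟩
      · rw [PySem.List.mem_enumerate_iff]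
        refine ⟨r, by simp [List.length_take]; omega, ?_⟩
        simp [List.getElem_take, hrowv]
      · rw [PySem.List.mem_enumerate_iff]
        refine ⟨c, by simp [List.length_take]; omega, ?_⟩
        simp [List.getElem_take, hcv]

-- the two ports are equal on every input
lemma ports_eq (black_region : List (Int × Int)) (matrix : List (List Int)) :
    get_white_boundary black_region matrix = get_white_boundary_alt black_region matrix := by
  unfold get_white_boundary get_white_boundary_alt
  have hiff : ∀ q : Int × Int, (PySem.Set.contains (pvWhitePixels matrix) q = true) ↔
      (0 ≤ q.1 ∧ q.1 < 10 ∧ 0 ≤ q.2 ∧ q.2 < 10 ∧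
        ((PySem.List.pyGet? matrix q.1).bind fun row => PySem.List.pyGet? row q.2) = some 1) := by
    intro q; rw [PySem.Set.contains_iff, mem_whitePixels]
  show _ = PySem.Set.inter _ _
  unfold PySem.Set.inter
  rw [PySem.Set.ofList_eq_foldl, ← foldl_if_filter (pvWhitePixels matrix) _ []]
  rw [List.foldl_flatMap]
  apply List.foldl_ext
  intro b p _
  rw [List.foldl_map]
  apply List.foldl_ext
  intro b d _
  simp only [hiff]

-- ===== VERDICT (by name: the statement is the Claim_ definition above) =====
theorem get_white_boundary_spec : Claim_equal_get_white_boundary := by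
  intro br m _ _
  unfold Spec_get_white_boundary
  exact ports_eq br m
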